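-- pv_equiv track=rewrite | github.com/toki866/ApexTraderAI | tools/check_leak_causality.py | _detect_action_col
-- ===== SOURCE A (Python) =====
-- from typing import List, Optional, Dict, Tuple
--
-- def _detect_action_col(cols: List[str]) -> Optional[str]:
--     for c in cols:
--         if c.lower() in ("action", "act", "a"):
--             return c
--     for c in cols:
--         if "action" in c.lower():
--             return c
--     return None
-- ===== SOURCE B (Python) =====
-- from typing import List, Optional
--
-- def _detect_action_col(cols: List[str]) -> Optional[str]:
--     exact = None
--     sub = None
--     for c in cols:
--         lc = c.lower()
--         if exact is None and lc in ("action", "act", "a"):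
--             exact = c
--         if sub is None and "action" in lc:
--             sub = c
--     return exact if exact is not None else sub
-- ===== Notes on version B (the rewrite author's own statement) =====
-- stated objective: alternative
-- what changed: Replaces A's two sequential scans (exact-match scan, then substring scan) with a single pass that records the first exact match and the first substring match in set-once accumulators and picks exact over substring at the end.
import Mathlib
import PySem

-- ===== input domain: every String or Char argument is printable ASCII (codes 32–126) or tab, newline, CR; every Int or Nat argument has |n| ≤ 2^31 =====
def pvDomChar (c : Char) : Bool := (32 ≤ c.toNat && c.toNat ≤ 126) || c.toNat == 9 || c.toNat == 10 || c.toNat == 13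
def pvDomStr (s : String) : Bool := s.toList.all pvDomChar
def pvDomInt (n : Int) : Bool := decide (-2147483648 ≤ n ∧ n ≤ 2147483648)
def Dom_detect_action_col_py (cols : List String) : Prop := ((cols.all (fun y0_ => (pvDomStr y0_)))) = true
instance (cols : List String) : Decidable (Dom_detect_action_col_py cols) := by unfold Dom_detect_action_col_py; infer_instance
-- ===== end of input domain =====

-- B fuses A's two sequential scans into one pass with two set-once accumulators; same cost, different structure.

-- ===== PORT A =====
-- first loop: return first c with c.lower() in ("action", "act", "a")
def pvALoop1 : List String → Option String
  | [] => none
  | c :: rest =>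
    if PySem.Str.lower c = "action" ∨ PySem.Str.lower c = "act" ∨ PySem.Str.lower c = "a" then some c
    else pvALoop1 rest

-- second loop: return first c with "action" in c.lower()
def pvALoop2 : List String → Option String
  | [] => none
  | c :: rest =>
    if PySem.Str.isIn "action" (PySem.Str.lower c) = true then some c
    else pvALoop2 rest

def detect_action_col_py (cols : List String) : Option String :=
  match pvALoop1 cols with
  | some c => some c
  | none => pvALoop2 cols

-- ===== PORT B =====
-- one step of B's single pass: set-once accumulators (exact, sub)
def pvBStep (st : Option String × Option String) (c : String) : Option String × Option String :=
  let lc := PySem.Str.lower c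
  ((if st.1 = none ∧ (lc = "action" ∨ lc = "act" ∨ lc = "a") then some c else st.1),
   (if st.2 = none ∧ PySem.Str.isIn "action" lc = true then some c else st.2))

def detect_action_col_py_alt (cols : List String) : Option String :=
  let st := cols.foldl pvBStep (none, none)
  match st.1 with
  | some c => some c
  | none => st.2

-- ===== PRECONDITION & SPEC =====
def Spec_detect_action_col_py (cols : List String) (out : Option String) : Prop := out = detect_action_col_py_alt cols
instance (cols : List String) (out : Option String) : Decidable (Spec_detect_action_col_py cols out) := by unfold Spec_detect_action_col_py; infer_instance

-- ===== CLAIM (what is proved, stated in full; the proofs are below) =====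
def Claim_equal_detect_action_col_py : Prop := ∀ (cols : List String), Dom_detect_action_col_py cols → Spec_detect_action_col_py cols (detect_action_col_py cols)

-- ===== LEMMAS AND PROOFS =====

lemma pvFold_eq : ∀ (cols : List String) (e s : Option String),
    cols.foldl pvBStep (e, s)
      = ((match e with | some x => some x | none => pvALoop1 cols),
         (match s with | some x => some x | none => pvALoop2 cols)) := by
  intro cols
  induction cols with
  | nil => intro e s; cases e <;> cases s <;> simp [pvALoop1, pvALoop2]
  | cons c rest ih =>
    intro e s
    simp only [List.foldl_cons, pvBStep, pvALoop1, pvALoop2]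
    cases e <;> cases s <;> simp [ih] <;> split_ifs <;> simp_all

-- ===== VERDICT (by name: the statement is the Claim_ definition above) =====
theorem detect_action_col_py_spec : Claim_equal_detect_action_col_py := by
  intro cols _
  unfold Spec_detect_action_col_py detect_action_col_py detect_action_col_py_alt
  rw [pvFold_eq]
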